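-- pv_equiv track=rewrite | github.com/thomjohs/Kandidat | App.py | confidentGuess
-- ===== SOURCE A (Python) =====
-- def confidentGuess(predictions, confNumber):
--     counts = {}
--     for pred in predictions:
--         if pred != 'background':
--             if pred in counts:
--                 counts[pred] += 1
--             else:
--                 counts[pred] = 1
--
--     for key, val in counts.items():
--         if val >= confNumber:
--             return key
--     return 'background'
-- ===== SOURCE B (Python) =====
-- def confidentGuess(predictions, confNumber):
--     seen = set()
--     for pred in predictions:
--         if pred != 'background' and pred not in seen:
--             seen.add(pred)
--             if predictions.count(pred) >= confNumber:
--                 return pred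
--     return 'background'
-- ===== Notes on version B (the rewrite author's own statement) =====
-- stated objective: alternative
-- what changed: Replaces the build-a-count-dict-then-scan-its-items two-phase algorithm with a single walk over predictions keeping a seen set: the first time each new non-'background' value appears its total is computed with predictions.count and returned immediately if it meets the threshold.
import Mathlib
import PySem

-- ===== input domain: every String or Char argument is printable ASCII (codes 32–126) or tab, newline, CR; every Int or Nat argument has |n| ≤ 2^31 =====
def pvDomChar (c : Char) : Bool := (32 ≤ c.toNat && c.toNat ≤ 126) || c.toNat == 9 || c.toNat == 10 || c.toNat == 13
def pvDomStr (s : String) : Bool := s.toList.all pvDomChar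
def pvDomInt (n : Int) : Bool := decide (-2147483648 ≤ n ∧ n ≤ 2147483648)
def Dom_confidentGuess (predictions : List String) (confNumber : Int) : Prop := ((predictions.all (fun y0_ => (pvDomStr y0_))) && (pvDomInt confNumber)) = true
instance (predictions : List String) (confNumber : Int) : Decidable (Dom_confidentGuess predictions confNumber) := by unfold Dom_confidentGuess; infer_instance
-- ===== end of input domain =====

-- B replaces A's build-count-dict-then-scan with a single walk keeping a seen set,
-- computing each new value's total with predictions.count (alternative decomposition; return value identical).

-- ===== PORT A =====
def pvBuildCounts (predictions : List String) : PySem.Dict String Int :=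
  predictions.foldl (fun counts pred =>
    if pred ≠ "background" then
      if counts.contains pred then counts.insert pred (counts.getD pred 0 + 1)
      else counts.insert pred 1
    else counts) PySem.Dict.empty

def pvScanItems (confNumber : Int) : List (String × Int) → String
  | [] => "background"
  | (key, val) :: rest => if confNumber ≤ val then key else pvScanItems confNumber rest

def confidentGuess (predictions : List String) (confNumber : Int) : String :=
  pvScanItems confNumber (pvBuildCounts predictions).items

-- ===== PORT B =====
def pvBLoop (predictions : List String) (confNumber : Int) : List String → PySem.Set String → String
  | [], _ => "background"
  | pred :: rest, seen =>
    if pred ≠ "background" ∧ PySem.Set.contains seen pred = false then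
      if confNumber ≤ (predictions.count pred : Int) then pred
      else pvBLoop predictions confNumber rest (PySem.Set.add seen pred)
    else pvBLoop predictions confNumber rest seen

def confidentGuess_alt (predictions : List String) (confNumber : Int) : String :=
  pvBLoop predictions confNumber predictions PySem.Set.empty

-- ===== PRECONDITION & SPEC =====
def Spec_confidentGuess (predictions : List String) (confNumber : Int) (out : String) : Prop := out = confidentGuess_alt predictions confNumber
instance (predictions : List String) (confNumber : Int) (out : String) : Decidable (Spec_confidentGuess predictions confNumber out) := by unfold Spec_confidentGuess; infer_instance

-- ===== CLAIM (what is proved, stated in full; the proofs are below) =====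
def Claim_equal_confidentGuess : Prop := ∀ (predictions : List String) (confNumber : Int), Dom_confidentGuess predictions confNumber → Spec_confidentGuess predictions confNumber (confidentGuess predictions confNumber)

-- ===== LEMMAS AND PROOFS =====

-- Bool form of the non-'background' test (proof-only helper)
def pvPB (x : String) : Bool := x ≠ "background"

-- first occurrences in t of non-'background' values not already in s (proof-only helper)
def pvNews : List String → PySem.Set String → List String
  | [], _ => []
  | h :: t, s =>
    if h ≠ "background" ∧ PySem.Set.contains s h = false then h :: pvNews t (PySem.Set.add s h)
    else pvNews t s

theorem pvNews_ne_bg (t : List String) (s : PySem.Set String) (k : String)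
    (hk : k ∈ pvNews t s) : k ≠ "background" := by
  induction t generalizing s with
  | nil => simp [pvNews] at hk
  | cons h t ih =>
    simp only [pvNews] at hk
    by_cases hcond : h ≠ "background" ∧ PySem.Set.contains s h = false
    · rw [if_pos hcond] at hk
      rcases List.mem_cons.mp hk with h1 | h2
      · exact h1 ▸ hcond.1
      · exact ih _ h2
    · rw [if_neg hcond] at hk
      exact ih _ hk

theorem pvUpdate_eq_append_news (t : List String) (s : PySem.Set String) :
    PySem.Set.update s (t.filter pvPB) = s ++ pvNews t s := by
  induction t generalizing s with
  | nil => simp [pvNews, PySem.Set.update]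
  | cons h t ih =>
    by_cases hbg : h = "background"
    · rw [List.filter_cons_of_neg (by simp [pvPB, hbg])]
      rw [ih, show pvNews (h :: t) s = pvNews t s by
        simp only [pvNews]; rw [if_neg (fun hcd => hcd.1 hbg)]]
    · by_cases hc : PySem.Set.contains s h = false
      · have hmem : h ∉ s := by simpa using hc
        have hadd : PySem.Set.add s h = s ++ [h] := by simp [PySem.Set.add, hmem]
        rw [List.filter_cons_of_pos (by simp [pvPB, hbg])]
        rw [show PySem.Set.update s (h :: t.filter pvPB)
            = PySem.Set.update (PySem.Set.add s h) (t.filter pvPB) from rfl, ih,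
          show pvNews (h :: t) s = h :: pvNews t (PySem.Set.add s h) by
            simp only [pvNews]; rw [if_pos ⟨hbg, hc⟩]]
        rw [hadd]; simp
      · have hc' : PySem.Set.contains s h = true := by
          cases hx : PySem.Set.contains s h
          · exact absurd hx hc
          · rfl
        have hmem : h ∈ s := by simpa using hc'
        have hadd : PySem.Set.add s h = s := by simp [PySem.Set.add, hmem]
        rw [List.filter_cons_of_pos (by simp [pvPB, hbg])]
        rw [show PySem.Set.update s (h :: t.filter pvPB)
            = PySem.Set.update (PySem.Set.add s h) (t.filter pvPB) from rfl, hadd, ih,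
          show pvNews (h :: t) s = pvNews t s by
            simp only [pvNews]; rw [if_neg (fun hcd => hc hcd.2)]]

theorem pvBLoop_eq_scan (xs : List String) (c : Int) (t : List String) (s : PySem.Set String) :
    pvBLoop xs c t s = pvScanItems c ((pvNews t s).map (fun k => (k, (xs.count k : Int)))) := by
  induction t generalizing s with
  | nil => simp [pvBLoop, pvNews, pvScanItems]
  | cons h t ih =>
    by_cases hcond : h ≠ "background" ∧ PySem.Set.contains s h = false
    · simp only [pvBLoop, pvNews]
      rw [if_pos hcond, if_pos hcond, List.map_cons]
      show _ = pvScanItems c ((h, (xs.count h : Int)) :: (pvNews t (PySem.Set.add s h)).map (fun k => (k, (xs.count k : Int))))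
      rw [show pvScanItems c ((h, (xs.count h : Int)) :: (pvNews t (PySem.Set.add s h)).map (fun k => (k, (xs.count k : Int))))
          = if c ≤ (xs.count h : Int) then h
            else pvScanItems c ((pvNews t (PySem.Set.add s h)).map (fun k => (k, (xs.count k : Int)))) from rfl]
      by_cases hle : c ≤ (xs.count h : Int)
      · rw [if_pos hle, if_pos hle]
      · rw [if_neg hle, if_neg hle]
        exact ih _
    · simp only [pvBLoop, pvNews]
      rw [if_neg hcond, if_neg hcond]
      exact ih _

theorem pvBuildCounts_eq_counter (predictions : List String) :
    pvBuildCounts predictions = PySem.Dict.counter (predictions.filter pvPB) := by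
  have hstep : pvBuildCounts predictions
      = predictions.foldl (fun counts pred =>
          if pvPB pred then counts.insert pred (counts.getD pred 0 + 1) else counts)
        PySem.Dict.empty := by
    unfold pvBuildCounts
    apply PySem.List.foldl_congr_mem
    intro d x _
    by_cases hbg : x = "background"
    · simp [pvPB, hbg]
    · by_cases hc : d.contains x = true
      · simp [pvPB, hbg, hc]
      · have hc' : d.contains x = false := by
          cases hx : d.contains x
          · rfl
          · exact absurd hx hc
        simp [pvPB, hbg, hc', PySem.Dict.getD_of_not_contains d (0 : Int) hc']
  rw [hstep, ← List.foldl_filter, PySem.Dict.foldl_insert_getD_add_one_eq_counter]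

theorem pvCount_filter_eq (xs : List String) (k : String) (hk : k ≠ "background") :
    (xs.filter pvPB).count k = xs.count k := by
  induction xs with
  | nil => rfl
  | cons h t ih =>
    by_cases hbg : h = "background"
    · subst hbg
      rw [List.filter_cons_of_neg (by simp [pvPB]), List.count_cons, ih]
      have : ("background" == k) = false := by
        simpa using fun e : "background" = k => hk e.symm
      simp [this]
    · rw [List.filter_cons_of_pos (by simp [pvPB, hbg]), List.count_cons, List.count_cons, ih]

-- ===== VERDICT (by name: the statement is the Claim_ definition above) =====
theorem confidentGuess_spec : Claim_equal_confidentGuess := by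
  intro predictions confNumber _
  unfold Spec_confidentGuess confidentGuess confidentGuess_alt
  rw [pvBuildCounts_eq_counter, PySem.Dict.items_counter,
    pvBLoop_eq_scan predictions confNumber predictions PySem.Set.empty]
  have hset : PySem.Set.ofList (predictions.filter pvPB)
      = pvNews predictions PySem.Set.empty := by
    have h := pvUpdate_eq_append_news predictions PySem.Set.empty
    simpa [PySem.Set.ofList_eq_foldl, PySem.Set.update, PySem.Set.empty] using h
  rw [hset]
  congr 1
  apply List.map_congr_left
  intro k hk
  rw [pvCount_filter_eq predictions k (pvNews_ne_bg predictions PySem.Set.empty k hk)]
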